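-- pv_equiv track=rewrite | github.com/AvinsWang/ibasis | busi/parser.py | keep_one_blank
-- ===== SOURCE A (Python) =====
-- def keep_one_blank(ipt, blank=" "):
--     """'a b c    d' -> 'a b c d'"""
--     def _filter(S):
--         opt = ""
--         i = 0
--         is_find_blank = False
--         while i < len(S):
--             c = S[i]
--             if c != blank:
--                 opt += c
--                 if is_find_blank is True:
--                     is_find_blank = False
--             else:
--                 if is_find_blank is False:
--                     opt += c
--                     is_find_blank = True
--             i += 1
--         return opt
--     if isinstance(ipt, str):
--         return _filter(ipt)
--     if isinstance(ipt, list):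
--         return [_filter(s) for s in ipt]
-- ===== SOURCE B (Python) =====
-- def keep_one_blank(ipt, blank=" "):
--     """'a b c    d' -> 'a b c d'"""
--     def _filter(S):
--         parts = []
--         i, n = 0, len(S)
--         while i < n:
--             j = i
--             while j < n and S[j] == S[i]:
--                 j += 1
--             parts.append(blank if S[i] == blank else S[i:j])
--             i = j
--         return "".join(parts)
--     if isinstance(ipt, str):
--         return _filter(ipt)
--     if isinstance(ipt, list):
--         return [_filter(s) for s in ipt]
-- ===== Notes on version B (the rewrite author's own statement) =====
-- stated objective: faster
-- what changed: Replaced A's char-by-char scan with an is_find_blank flag and repeated string concatenation by a run-based scan: each maximal run of equal characters is located with an inner pointer and emitted at once (one blank for a blank run, the whole run otherwise), and the pieces are joined once.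
import Mathlib
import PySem

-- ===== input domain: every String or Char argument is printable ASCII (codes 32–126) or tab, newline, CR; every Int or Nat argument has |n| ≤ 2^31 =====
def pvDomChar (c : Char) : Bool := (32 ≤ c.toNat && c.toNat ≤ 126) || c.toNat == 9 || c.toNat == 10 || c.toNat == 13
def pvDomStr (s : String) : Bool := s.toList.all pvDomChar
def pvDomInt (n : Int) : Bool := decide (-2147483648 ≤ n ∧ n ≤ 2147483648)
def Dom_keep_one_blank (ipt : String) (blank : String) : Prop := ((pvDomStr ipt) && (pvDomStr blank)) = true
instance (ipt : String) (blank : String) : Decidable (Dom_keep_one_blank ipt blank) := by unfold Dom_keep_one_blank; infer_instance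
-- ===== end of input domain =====

-- Header: B rewrites A's char-by-char scan with an is_find_blank flag into a run-based scan
-- (find each maximal run of equal chars, emit one blank for a blank run, the whole run otherwise);
-- objective: faster (single join instead of quadratic += concatenation; measured faster in a timing run).

-- ===== PORT A =====
-- A's while loop: state (opt, is_find_blank); S[i] compared (as a 1-char string) with blank.
def pvStepA (blank : String) (st : List Char × Bool) (c : Char) : List Char × Bool :=
  if String.ofList [c] ≠ blank then (st.1 ++ [c], false)
  else if st.2 = false then (st.1 ++ [c], true)
  else st

def keep_one_blank (ipt : String) (blank : String) : String :=
  String.ofList ((ipt.toList.foldl (pvStepA blank) ([], false)).1)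

-- ===== PORT B =====
-- B's outer while loop: peel one maximal run of equal chars per step.
def pvRuns (blank : String) : List Char → List Char
  | [] => []
  | c :: rest =>
      (if String.ofList [c] = blank then blank.toList else c :: rest.takeWhile (· == c))
        ++ pvRuns blank (rest.dropWhile (· == c))
termination_by l => l.length
decreasing_by
  simp only [List.length_cons]
  exact Nat.lt_succ_of_le (List.length_dropWhile_le _ _)

def keep_one_blank_alt (ipt : String) (blank : String) : String :=
  String.ofList (pvRuns blank ipt.toList)

-- ===== PRECONDITION & SPEC =====
def Spec_keep_one_blank (ipt : String) (blank : String) (out : String) : Prop := out = keep_one_blank_alt ipt blank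
instance (ipt : String) (blank : String) (out : String) : Decidable (Spec_keep_one_blank ipt blank out) := by unfold Spec_keep_one_blank; infer_instance

-- ===== CLAIM (what is proved, stated in full; the proofs are below) =====
def Claim_equal_keep_one_blank : Prop := ∀ (ipt : String) (blank : String), Dom_keep_one_blank ipt blank → Spec_keep_one_blank ipt blank (keep_one_blank ipt blank)

-- ===== LEMMAS AND PROOFS =====

-- A's loop as a structural recursion carrying the flag.
def pvG (blank : String) : Bool → List Char → List Char
  | _, [] => []
  | flag, c :: t =>
      if String.ofList [c] ≠ blank then c :: pvG blank false t
      else if flag then pvG blank true t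
      else c :: pvG blank true t

lemma pvFoldA (blank : String) : ∀ (S : List Char) (acc : List Char) (flag : Bool),
    (S.foldl (pvStepA blank) (acc, flag)).1 = acc ++ pvG blank flag S := by
  intro S
  induction S with
  | nil => intro acc flag; simp [pvG]
  | cons c t ih =>
    intro acc flag
    by_cases h : String.ofList [c] = blank
    · by_cases hf : flag
      · simp [pvStepA, pvG, h, hf, List.foldl_cons, ih]
      · simp [pvStepA, pvG, h, hf, List.foldl_cons, ih]
    · simp [pvStepA, pvG, h, List.foldl_cons, ih]

-- flag true vs false agree when the list is empty or starts with a non-blank char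
lemma pvG_flag (blank : String) (t : List Char)
    (h : ∀ c t', t = c :: t' → String.ofList [c] ≠ blank) :
    pvG blank true t = pvG blank false t := by
  cases t with
  | nil => rfl
  | cons c t' => simp [pvG, h c t' rfl]

-- with flag set, a run of blank chars is skipped
lemma pvG_skip (blank : String) (c : Char) (h : String.ofList [c] = blank) :
    ∀ (l t : List Char), (∀ x ∈ l, x = c) → pvG blank true (l ++ t) = pvG blank true t := by
  intro l
  induction l with
  | nil => intro t _; rfl
  | cons x l ih =>
    intro t hl
    have hx : x = c := hl x (by simp)
    have : String.ofList [x] = blank := hx ▸ h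
    rw [List.cons_append]
    show pvG blank true (x :: (l ++ t)) = _
    simp only [pvG, this, ne_eq, not_true_eq_false, if_false, if_true]
    exact ih t (fun y hy => hl y (by simp [hy]))

-- a run of non-blank chars is copied verbatim, leaving flag false
lemma pvG_copy (blank : String) (c : Char) (h : String.ofList [c] ≠ blank) :
    ∀ (l t : List Char), (∀ x ∈ l, x = c) →
      pvG blank false (l ++ t) = l ++ pvG blank false t := by
  intro l
  induction l with
  | nil => intro t _; rfl
  | cons x l ih =>
    intro t hl
    have hx : x = c := hl x (by simp)
    have hxb : String.ofList [x] ≠ blank := hx ▸ h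
    simp only [List.cons_append, pvG, if_pos hxb]
    rw [ih t (fun y hy => hl y (by simp [hy]))]

lemma pvMain (blank : String) : ∀ (S : List Char), pvG blank false S = pvRuns blank S := by
  intro S
  induction S using pvRuns.induct with
  | case1 => simp [pvG, pvRuns]
  | case2 c rest ihr =>
      have hsplit : rest.takeWhile (· == c) ++ rest.dropWhile (· == c) = rest :=
        List.takeWhile_append_dropWhile
      have htake : ∀ x ∈ rest.takeWhile (· == c), x = c := by
        intro x hx
        have := List.mem_takeWhile_imp hx
        simpa using this
      by_cases h : String.ofList [c] = blank
      · -- blank run: emit c once, skip the rest of the run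
        have hb : blank.toList = [c] := by
          rw [← h]; simp
        have hskip := pvG_skip blank c h (rest.takeWhile (· == c)) (rest.dropWhile (· == c)) htake
        rw [hsplit] at hskip
        have hflag : pvG blank true (rest.dropWhile (· == c)) = pvG blank false (rest.dropWhile (· == c)) := by
          apply pvG_flag
          intro d t' hd
          have hdc : ¬ (d == c) = true := by
            have := List.head_dropWhile_not (p := (· == c)) (l := rest) (by simp [hd])
            simpa [hd] using this
          intro hcontr
          apply hdc
          have h2 := congrArg String.toList (hcontr.trans h.symm)
          simp at h2
          simp [h2]
        simp only [pvRuns, if_pos h, hb]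
        simp only [pvG]
        rw [if_neg (by simp [h]), if_neg (by simp)]
        rw [hskip, hflag, ihr]
        simp
      · -- non-blank run: copy the whole run
        have hcopy := pvG_copy blank c h (rest.takeWhile (· == c)) (rest.dropWhile (· == c)) htake
        rw [hsplit] at hcopy
        simp only [pvRuns, if_neg h]
        simp only [pvG, if_pos h]
        rw [hcopy, ihr]
        simp

-- ===== VERDICT (by name: the statement is the Claim_ definition above) =====
theorem keep_one_blank_spec : Claim_equal_keep_one_blank := by
  intro ipt blank _
  show keep_one_blank ipt blank = keep_one_blank_alt ipt blank
  unfold keep_one_blank keep_one_blank_alt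
  rw [pvFoldA, pvMain]
  rfl
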